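-- pv_equiv track=rewrite | github.com/jarrodmillman/rcsds | tools/proc_rst.py | proc_notebook
-- ===== SOURCE A (Python) =====
-- def line_indent(line):
--     return len(line) - len(line.lstrip())
--
-- def is_empty(line):
--     return line.strip() == ''
--
-- def proc_body(body, indent):
--     spaces = ' ' * indent
--     new_body = ['.. plot::\n', spaces + ':context:\n']
--     plts = [line for line in body if line.strip().startswith('plt.')]
--     if len(plts) == 0:
--         new_body.append(spaces + ':nofigs:\n')
--     new_body.append('\n')
--     # Ignore trailing blank lines
--     n_good = len(body)
--     for line in body[::-1]:
--         if not is_empty(line):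
--             break
--         n_good -= 1
--
--     for line in body[:n_good]:
--         if is_empty(line):
--             new_body.append(line)
--             continue
--         if line_indent(line) == indent:
--             new_line = spaces + '>>> ' + line.lstrip()
--             new_body.append(new_line)
--             continue
--         new_line = spaces + '... ' + line.lstrip()
--         new_body.append(new_line)
--     return new_body
--
-- def proc_notebook(contents):
--     new_contents = []
--     state = 'default'
--     for line in contents:
--         if state == 'default':
--             if line.startswith('.. code:: python'):
--                 state = 'code-block-line0'
--             else:
--                 new_contents.append(line)
--             continue
--         if state == 'code-block-line0':
--             if line.strip() == '':
--                 continue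
--             block_indent = line_indent(line)
--             block_body = []
--             state = 'code-block-body'
--         if state == 'code-block-body':
--             if not is_empty(line) and line_indent(line) < block_indent:
--                 state = 'waiting-for-pl'
--                 new_contents += proc_body(block_body, block_indent)
--             block_body.append(line)
--         if state == 'waiting-for-pl':
--             if line.startswith('.. parsed-literal::'):
--                 state = 'in-pl-line0'
--                 continue
--             new_contents.append('\n')  # Restore trailing blank
--             new_contents.append(line)
--             state = 'default'
--         if state == 'in-pl-line0':
--             if is_empty(line):
--                 continue
--             new_contents.append(line)
--             state = 'default'
--
--     return new_contents
-- ===== SOURCE B (Python) =====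
-- def _line_indent(line):
--     return len(line) - len(line.lstrip())
--
--
-- def _skip_blanks(lines):
--     # drop leading blank lines
--     i = 0
--     while i < len(lines) and lines[i].strip() == '':
--         i += 1
--     return lines[i:]
--
--
-- def _render_body(body, indent):
--     spaces = ' ' * indent
--     head = ['.. plot::\n', spaces + ':context:\n']
--     if not any(line.strip().startswith('plt.') for line in body):
--         head.append(spaces + ':nofigs:\n')
--     head.append('\n')
--     trimmed = _skip_blanks(body[::-1])[::-1]  # drop trailing blank lines
--     return head + [
--         line if line.strip() == '' else
--         spaces + ('>>> ' if _line_indent(line) == indent else '... ') + line.lstrip()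
--         for line in trimmed
--     ]
--
--
-- def proc_notebook(contents):
--     out = []
--     i = 0
--     n = len(contents)
--     while i < n:
--         line = contents[i]
--         i += 1
--         if not line.startswith('.. code:: python'):
--             out.append(line)
--             continue
--         # skip blank lines after the marker
--         while i < n and contents[i].strip() == '':
--             i += 1
--         if i >= n:
--             break  # marker at end of input: nothing to emit
--         indent = _line_indent(contents[i])
--         start = i
--         while i < n and (contents[i].strip() == '' or _line_indent(contents[i]) >= indent):
--             i += 1
--         if i >= n:
--             break  # input ends mid-body: block is dropped (as in the original)
--         out += _render_body(contents[start:i], indent)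
--         dedent = contents[i]
--         i += 1
--         if dedent.startswith('.. parsed-literal::'):
--             while i < n and contents[i].strip() == '':
--                 i += 1
--             if i < n:
--                 out.append(contents[i])
--                 i += 1
--         else:
--             out.append('\n')
--             out.append(dedent)
--     return out
-- ===== Notes on version B (the rewrite author's own statement) =====
-- stated objective: alternative
-- what changed: A's per-line five-state state-machine loop is replaced by a block-consuming loop: copy lines until a '.. code:: python' marker, then skip blanks, gather the indented body in one inner scan, render it, and handle the dedent/parsed-literal line directly; the body renderer builds the trimmed body and the '>>>/...' lines with a reverse-skip and a comprehension instead of A's n_good countdown and accumulator folds.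
import Mathlib
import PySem

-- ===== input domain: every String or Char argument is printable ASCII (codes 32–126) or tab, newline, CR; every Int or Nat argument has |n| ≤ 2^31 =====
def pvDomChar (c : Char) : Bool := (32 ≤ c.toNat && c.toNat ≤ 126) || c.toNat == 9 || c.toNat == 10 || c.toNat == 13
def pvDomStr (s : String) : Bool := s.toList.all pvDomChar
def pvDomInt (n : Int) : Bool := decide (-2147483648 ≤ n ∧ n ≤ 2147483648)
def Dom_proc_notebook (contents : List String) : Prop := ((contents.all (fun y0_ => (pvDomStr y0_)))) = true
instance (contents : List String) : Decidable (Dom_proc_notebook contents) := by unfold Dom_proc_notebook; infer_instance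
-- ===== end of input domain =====

-- B rewrites A's per-line five-state loop as a block-consuming loop (same outputs, same cost); equivalence of the return values is proved below.

-- shared one-line helpers (both Pythons define them identically)
def pvLineIndent (line : String) : Int := PySem.Str.len line - PySem.Str.len (PySem.Str.lstrip line)
def pvIsEmpty (line : String) : Bool := PySem.Str.strip line == ""
def pvSpaces (indent : Int) : String := String.ofList (List.replicate indent.toNat ' ')

-- ===== PORT A =====

-- n_good loop: walk body[::-1], decrement until the first non-blank line (break)
def pvNgood : List String → Nat → Nat
  | [], n => n
  | l :: ls, n => if ¬ pvIsEmpty l then n else pvNgood ls (n - 1)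

def proc_body (body : List String) (indent : Int) : List String :=
  let spaces := pvSpaces indent
  let newBody := [".. plot::\n", spaces ++ ":context:\n"]
  let plts := body.filter (fun line => PySem.Str.startswith (PySem.Str.strip line) "plt.")
  let newBody := if plts.length = 0 then newBody ++ [spaces ++ ":nofigs:\n"] else newBody
  let newBody := newBody ++ ["\n"]
  let nGood := pvNgood body.reverse body.length
  (body.take nGood).foldl
    (fun acc line =>
      if pvIsEmpty line then acc ++ [line]
      else if pvLineIndent line = indent then acc ++ [spaces ++ ">>> " ++ PySem.Str.lstrip line]
      else acc ++ [spaces ++ "... " ++ PySem.Str.lstrip line])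
    newBody

inductive PvTag | default | line0 | body | waiting | inpl0
deriving DecidableEq, Repr

structure PvSt where
  out : List String
  tag : PvTag
  bi : Int
  bb : List String
deriving Repr

def pvStep (s : PvSt) (line : String) : PvSt :=
  if s.tag = .default then
    if PySem.Str.startswith line ".. code:: python" then { s with tag := .line0 }
    else { s with out := s.out ++ [line] }
  else if s.tag = .line0 ∧ pvIsEmpty line then s  -- continue
  else
    let s1 := if s.tag = .line0 then { s with tag := .body, bi := pvLineIndent line, bb := [] } else s
    let s2 :=
      if s1.tag = .body then
        let s' := if ¬ pvIsEmpty line ∧ pvLineIndent line < s1.bi then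
                    { s1 with tag := .waiting, out := s1.out ++ proc_body s1.bb s1.bi }
                  else s1
        { s' with bb := s'.bb ++ [line] }
      else s1
    if s2.tag = .waiting then
      if PySem.Str.startswith line ".. parsed-literal::" then { s2 with tag := .inpl0 }  -- continue
      else { s2 with out := s2.out ++ ["\n", line], tag := .default }
    else if s2.tag = .inpl0 then
      if pvIsEmpty line then s2  -- continue
      else { s2 with out := s2.out ++ [line], tag := .default }
    else s2

def proc_notebook (contents : List String) : List String :=
  (contents.foldl pvStep ⟨[], .default, 0, []⟩).out

-- ===== PORT B =====

-- while lines and lines[0] blank: advance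
def pvSkipBlanks : List String → List String
  | [] => []
  | l :: ls => if pvIsEmpty l then pvSkipBlanks ls else l :: ls

theorem pvSkipBlanks_len_le (ls : List String) : (pvSkipBlanks ls).length ≤ ls.length := by
  induction ls with
  | nil => simp [pvSkipBlanks]
  | cons l ls ih => simp only [pvSkipBlanks]; split <;> simp <;> omega

def pvRenderBody (body : List String) (indent : Int) : List String :=
  let spaces := pvSpaces indent
  let head := [".. plot::\n", spaces ++ ":context:\n"]
  let head := if ¬ body.any (fun line => PySem.Str.startswith (PySem.Str.strip line) "plt.") then
                head ++ [spaces ++ ":nofigs:\n"] else head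
  let head := head ++ ["\n"]
  let trimmed := (pvSkipBlanks body.reverse).reverse
  head ++ trimmed.map (fun line =>
    if pvIsEmpty line then line
    else spaces ++ (if pvLineIndent line = indent then ">>> " else "... ") ++ PySem.Str.lstrip line)

-- the inner gathering loop: split off the prefix of blank-or-indented-enough lines
def pvGatherBody (indent : Int) : List String → List String × List String
  | [] => ([], [])
  | l :: ls =>
    if pvIsEmpty l ∨ pvLineIndent l ≥ indent then
      let p := pvGatherBody indent ls
      (l :: p.1, p.2)
    else ([], l :: ls)

theorem pvGatherBody_snd_len_le (indent : Int) (ls : List String) :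
    (pvGatherBody indent ls).2.length ≤ ls.length := by
  induction ls with
  | nil => simp [pvGatherBody]
  | cons l ls ih => simp only [pvGatherBody]; split <;> simp <;> omega

-- B's main loop: one mutually recursive function per segment of the loop body
-- (each 'xx2' matches on the list its companion just computed)
mutual
def pvAltGo : List String → List String
  | [] => []
  | line :: rest =>
    if PySem.Str.startswith line ".. code:: python" then pvAfterCode rest
    else line :: pvAltGo rest
termination_by ls => (ls.length, 0)
decreasing_by
  · simp_wf; omega
  · simp_wf; omega

-- skip the blank lines after the '.. code:: python' marker, stop at end of input
def pvAfterCode (ls : List String) : List String :=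
  pvAfterCode2 (pvSkipBlanks ls)
termination_by (ls.length, 4)
decreasing_by
  have := pvSkipBlanks_len_le ls
  omega

-- first non-blank line fixes the block indent; gather the body from here
def pvAfterCode2 : List String → List String
  | [] => []
  | first :: rest1 => pvBodyPhase (pvLineIndent first) [] (first :: rest1)
termination_by ls => (ls.length, 3)
decreasing_by simp_wf; omega

def pvBodyPhase (bi : Int) (bb : List String) (ls : List String) : List String :=
  pvBodyPhase2 bi bb (pvGatherBody bi ls)
termination_by (ls.length, 2)
decreasing_by
  have := pvGatherBody_snd_len_le bi ls
  omega

-- input exhausted mid-body: the block is dropped; otherwise emit it and handle the dedent line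
def pvBodyPhase2 (bi : Int) (bb : List String) : List String × List String → List String
  | (_, []) => []
  | (more, dedent :: rest2) =>
    pvRenderBody (bb ++ more) bi ++
      (if PySem.Str.startswith dedent ".. parsed-literal::" then pvPlPhase rest2
       else "\n" :: dedent :: pvAltGo rest2)
termination_by p => (p.2.length, 0)
decreasing_by
  · simp_wf; omega
  · simp_wf; omega

-- after '.. parsed-literal::': skip blanks, copy the next line if any
def pvPlPhase (ls : List String) : List String :=
  pvPlPhase2 (pvSkipBlanks ls)
termination_by (ls.length, 1)
decreasing_by
  have := pvSkipBlanks_len_le ls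
  omega

def pvPlPhase2 : List String → List String
  | [] => []
  | x :: r => x :: pvAltGo r
termination_by ls => (ls.length, 0)
decreasing_by simp_wf; omega
end

def proc_notebook_alt (contents : List String) : List String := pvAltGo contents

-- ===== PRECONDITION & SPEC =====
def Spec_proc_notebook (contents : List String) (out : List String) : Prop := out = proc_notebook_alt contents
instance (contents : List String) (out : List String) : Decidable (Spec_proc_notebook contents out) := by unfold Spec_proc_notebook; infer_instance

-- ===== CLAIM (what is proved, stated in full; the proofs are below) =====
def Claim_equal_proc_notebook : Prop := ∀ (contents : List String), Dom_proc_notebook contents → Spec_proc_notebook contents (proc_notebook contents)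

-- ===== LEMMAS AND PROOFS =====

-- ---- proc_body = pvRenderBody ----

theorem pvNgood_le (ls : List String) : ∀ n, pvNgood ls n ≤ n := by
  induction ls with
  | nil => intro n; simp [pvNgood]
  | cons l ls ih =>
    intro n
    simp only [pvNgood]
    split
    · exact le_rfl
    · exact le_trans (ih (n - 1)) (Nat.sub_le n 1)

theorem pvTake_ngood_rev (rs : List String) :
    rs.reverse.take (pvNgood rs rs.length) = (pvSkipBlanks rs).reverse := by
  induction rs with
  | nil => simp [pvNgood, pvSkipBlanks]
  | cons l rs ih =>
    by_cases hb : pvIsEmpty l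
    · have h1 : pvNgood (l :: rs) (l :: rs).length = pvNgood rs rs.length := by
        simp [pvNgood, hb]
      have h2 : pvNgood rs rs.length ≤ rs.reverse.length := by
        simpa using pvNgood_le rs rs.length
      rw [h1, List.reverse_cons, List.take_append_of_le_length h2, ih]
      simp [pvSkipBlanks, hb]
    · have h1 : pvNgood (l :: rs) (l :: rs).length = (l :: rs).length := by
        simp [pvNgood, hb]
      rw [h1, List.take_of_length_le (by simp)]
      simp [pvSkipBlanks, hb]

theorem pvTake_ngood (body : List String) :
    body.take (pvNgood body.reverse body.length) = (pvSkipBlanks body.reverse).reverse := by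
  have := pvTake_ngood_rev body.reverse
  simpa using this

theorem proc_body_eq_render (body : List String) (indent : Int) :
    proc_body body indent = pvRenderBody body indent := by
  simp only [proc_body, pvRenderBody, pvTake_ngood]
  rw [show (fun (acc : List String) line =>
        if pvIsEmpty line then acc ++ [line]
        else if pvLineIndent line = indent then acc ++ [pvSpaces indent ++ ">>> " ++ PySem.Str.lstrip line]
        else acc ++ [pvSpaces indent ++ "... " ++ PySem.Str.lstrip line])
      = (fun (acc : List String) line => acc ++
          [if pvIsEmpty line then line
           else pvSpaces indent ++ (if pvLineIndent line = indent then ">>> " else "... ") ++ PySem.Str.lstrip line])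
      from funext fun acc => funext fun line => by split_ifs <;> rfl]
  rw [PySem.List.foldl_append_singleton_eq_map]
  congr 2
  simp [List.length_eq_zero_iff, List.filter_eq_nil_iff, List.any_eq_true]

-- ---- how one pvStep acts from each reachable state ----

theorem step_default_code {out bi bb line} (h : PySem.Str.startswith line ".. code:: python" = true) :
    pvStep ⟨out, .default, bi, bb⟩ line = ⟨out, .line0, bi, bb⟩ := by
  simp at h
  simp [pvStep, h]

theorem step_default_text {out bi bb line} (h : ¬ PySem.Str.startswith line ".. code:: python" = true) :
    pvStep ⟨out, .default, bi, bb⟩ line = ⟨out ++ [line], .default, bi, bb⟩ := by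
  simp at h
  simp [pvStep, h]

theorem step_line0_blank {out bi bb line} (h : pvIsEmpty line = true) :
    pvStep ⟨out, .line0, bi, bb⟩ line = ⟨out, .line0, bi, bb⟩ := by
  simp [pvStep, h]

theorem step_line0_nonblank {out bi bb line} (h : ¬ pvIsEmpty line = true) :
    pvStep ⟨out, .line0, bi, bb⟩ line = ⟨out, .body, pvLineIndent line, [line]⟩ := by
  simp [pvStep, h]

theorem step_body_keep {out bi bb line} (h : pvIsEmpty line = true ∨ pvLineIndent line ≥ bi) :
    pvStep ⟨out, .body, bi, bb⟩ line = ⟨out, .body, bi, bb ++ [line]⟩ := by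
  rcases h with h | h
  · simp [pvStep, h]
  · simp [pvStep, not_lt.mpr h]

theorem step_body_flush_pl {out bi bb line} (h1 : ¬ pvIsEmpty line = true) (h2 : pvLineIndent line < bi)
    (h3 : PySem.Str.startswith line ".. parsed-literal::" = true) :
    pvStep ⟨out, .body, bi, bb⟩ line = ⟨out ++ proc_body bb bi, .inpl0, bi, bb ++ [line]⟩ := by
  simp at h3
  simp [pvStep, h1, h2, h3]

theorem step_body_flush_text {out bi bb line} (h1 : ¬ pvIsEmpty line = true) (h2 : pvLineIndent line < bi)
    (h3 : ¬ PySem.Str.startswith line ".. parsed-literal::" = true) :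
    pvStep ⟨out, .body, bi, bb⟩ line = ⟨out ++ proc_body bb bi ++ ["\n", line], .default, bi, bb ++ [line]⟩ := by
  simp at h3
  simp [pvStep, h1, h2, h3]

theorem step_inpl0_blank {out bi bb line} (h : pvIsEmpty line = true) :
    pvStep ⟨out, .inpl0, bi, bb⟩ line = ⟨out, .inpl0, bi, bb⟩ := by
  simp [pvStep, h]

theorem step_inpl0_text {out bi bb line} (h : ¬ pvIsEmpty line = true) :
    pvStep ⟨out, .inpl0, bi, bb⟩ line = ⟨out ++ [line], .default, bi, bb⟩ := by
  simp [pvStep, h]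

-- ---- unfolding equations for B's phases ----

theorem altGo_nil : pvAltGo [] = [] := by simp [pvAltGo]

theorem altGo_cons_code {l ls} (h : PySem.Str.startswith l ".. code:: python" = true) :
    pvAltGo (l :: ls) = pvAfterCode ls := by
  simp at h
  simp [pvAltGo, h]

theorem altGo_cons_text {l ls} (h : ¬ PySem.Str.startswith l ".. code:: python" = true) :
    pvAltGo (l :: ls) = l :: pvAltGo ls := by
  simp at h
  simp [pvAltGo, h]

theorem afterCode_eq (ls : List String) :
    pvAfterCode ls = pvAfterCode2 (pvSkipBlanks ls) := by
  rw [pvAfterCode]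

theorem afterCode_nil : pvAfterCode [] = [] := by
  rw [afterCode_eq]; simp [pvSkipBlanks, pvAfterCode2]

theorem afterCode_blank {l ls} (h : pvIsEmpty l = true) :
    pvAfterCode (l :: ls) = pvAfterCode ls := by
  rw [afterCode_eq, afterCode_eq]
  simp [pvSkipBlanks, h]

theorem afterCode_nonblank {l ls} (h : ¬ pvIsEmpty l = true) :
    pvAfterCode (l :: ls) = pvBodyPhase (pvLineIndent l) [] (l :: ls) := by
  rw [afterCode_eq]
  simp [pvSkipBlanks, h, pvAfterCode2]

theorem bodyPhase_eq (bi : Int) (bb ls : List String) :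
    pvBodyPhase bi bb ls = pvBodyPhase2 bi bb (pvGatherBody bi ls) := by
  rw [pvBodyPhase]

theorem bodyPhase_nil (bi : Int) (bb : List String) : pvBodyPhase bi bb [] = [] := by
  rw [bodyPhase_eq]; simp [pvGatherBody, pvBodyPhase2]

theorem bodyPhase_keep {bi : Int} {bb l ls} (h : pvIsEmpty l = true ∨ pvLineIndent l ≥ bi) :
    pvBodyPhase bi bb (l :: ls) = pvBodyPhase bi (bb ++ [l]) ls := by
  rw [bodyPhase_eq, bodyPhase_eq]
  have hg : pvGatherBody bi (l :: ls) = (l :: (pvGatherBody bi ls).1, (pvGatherBody bi ls).2) := by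
    simp [pvGatherBody, h]
  rw [hg]
  rcases hgg : pvGatherBody bi ls with ⟨more, rest2⟩
  cases rest2 with
  | nil => simp [pvBodyPhase2]
  | cons dedent rest2 => simp [pvBodyPhase2]

theorem bodyPhase_dedent {bi : Int} {bb l ls} (h1 : ¬ pvIsEmpty l = true) (h2 : pvLineIndent l < bi) :
    pvBodyPhase bi bb (l :: ls) = pvRenderBody bb bi ++
      (if PySem.Str.startswith l ".. parsed-literal::" then pvPlPhase ls
       else "\n" :: l :: pvAltGo ls) := by
  rw [bodyPhase_eq]
  have hg : pvGatherBody bi (l :: ls) = ([], l :: ls) := by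
    simp [pvGatherBody, h1, not_le.mpr h2]
  rw [hg]
  simp [pvBodyPhase2]

theorem plPhase_eq (ls : List String) : pvPlPhase ls = pvPlPhase2 (pvSkipBlanks ls) := by
  rw [pvPlPhase]

theorem plPhase_nil : pvPlPhase [] = [] := by
  rw [plPhase_eq]; simp [pvSkipBlanks, pvPlPhase2]

theorem plPhase_blank {l ls} (h : pvIsEmpty l = true) : pvPlPhase (l :: ls) = pvPlPhase ls := by
  rw [plPhase_eq, plPhase_eq]; simp [pvSkipBlanks, h]

theorem plPhase_text {l ls} (h : ¬ pvIsEmpty l = true) : pvPlPhase (l :: ls) = l :: pvAltGo ls := by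
  rw [plPhase_eq]; simp [pvSkipBlanks, h, pvPlPhase2]

-- ---- the simulation: A's state machine from each reachable state computes B's phases ----

theorem pvSim : ∀ (n : Nat) (ls : List String), ls.length ≤ n →
    (∀ out bi bb, (ls.foldl pvStep ⟨out, .default, bi, bb⟩).out = out ++ pvAltGo ls)
    ∧ (∀ out bi bb, (ls.foldl pvStep ⟨out, .line0, bi, bb⟩).out = out ++ pvAfterCode ls)
    ∧ (∀ out bi bb, (ls.foldl pvStep ⟨out, .body, bi, bb⟩).out = out ++ pvBodyPhase bi bb ls)
    ∧ (∀ out bi bb, (ls.foldl pvStep ⟨out, .inpl0, bi, bb⟩).out = out ++ pvPlPhase ls) := by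
  intro n
  induction n with
  | zero =>
    intro ls hlen
    have : ls = [] := List.length_eq_zero_iff.mp (Nat.le_zero.mp hlen)
    subst this
    refine ⟨?_, ?_, ?_, ?_⟩ <;> intro out bi bb <;>
      simp [altGo_nil, afterCode_nil, bodyPhase_nil, plPhase_nil]
  | succ n ih =>
    intro ls hlen
    cases ls with
    | nil =>
      refine ⟨?_, ?_, ?_, ?_⟩ <;> intro out bi bb <;>
        simp [altGo_nil, afterCode_nil, bodyPhase_nil, plPhase_nil]
    | cons l ls =>
      have hlen' : ls.length ≤ n := by simpa using Nat.succ_le_succ_iff.mp (by simpa using hlen)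
      obtain ⟨ihD, ihL0, ihB, ihP⟩ := ih ls hlen'
      refine ⟨?_, ?_, ?_, ?_⟩ <;> intro out bi bb
      · -- default
        by_cases hc : PySem.Str.startswith l ".. code:: python" = true
        · rw [List.foldl_cons, step_default_code hc, ihL0, altGo_cons_code hc]
        · rw [List.foldl_cons, step_default_text hc, ihD, altGo_cons_text hc]
          simp
      · -- line0
        by_cases hb : pvIsEmpty l = true
        · rw [List.foldl_cons, step_line0_blank hb, ihL0, afterCode_blank hb]
        · rw [List.foldl_cons, step_line0_nonblank hb, ihB, afterCode_nonblank hb,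
              bodyPhase_keep (Or.inr le_rfl)]
          simp
      · -- body
        by_cases hq : pvIsEmpty l = true ∨ pvLineIndent l ≥ bi
        · rw [List.foldl_cons, step_body_keep hq, ihB, bodyPhase_keep hq]
        · push Not at hq
          obtain ⟨h1, h2⟩ := hq
          by_cases hpl : PySem.Str.startswith l ".. parsed-literal::" = true
          · rw [List.foldl_cons, step_body_flush_pl h1 h2 hpl, ihP,
                bodyPhase_dedent h1 h2, proc_body_eq_render]
            simp at hpl
            simp [hpl]
          · rw [List.foldl_cons, step_body_flush_text h1 h2 hpl, ihD,
                bodyPhase_dedent h1 h2, proc_body_eq_render]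
            simp at hpl
            simp [hpl]
      · -- inpl0
        by_cases hb : pvIsEmpty l = true
        · rw [List.foldl_cons, step_inpl0_blank hb, ihP, plPhase_blank hb]
        · rw [List.foldl_cons, step_inpl0_text hb, ihD, plPhase_text hb]
          simp

-- ===== VERDICT (by name: the statement is the Claim_ definition above) =====
theorem proc_notebook_spec : Claim_equal_proc_notebook := by
  intro contents _
  unfold Spec_proc_notebook proc_notebook proc_notebook_alt
  exact (pvSim contents.length contents le_rfl).1 [] 0 []
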